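-- pv_equiv track=rewrite | github.com/mkalino1/Traveling_Salesman_Problem | heuristic.py | alternative_heuristic
-- ===== SOURCE A (Python) =====
-- def alternative_heuristic(non_visited_cities, roads):
--     inner_roads = []
--     for i in range(len(roads)):
--         if i in non_visited_cities:
--             inner_roads.append(
--                 [roads[i][j] for j in range(len(roads)) if j in non_visited_cities]) # zmniejszamy tablice roads tylko do miast z non_visited_cities
--
--     table = []
--     for i in range(len(inner_roads)):
--         for j in range(len(inner_roads)):
--             table.append(inner_roads[i][j])
--     table.sort()
--     val = 0
--     if len(table) == 0:
--         return 0
--     for i in range(len(inner_roads) - 1): #sumujemy N-1 najkrotszych odleglosci z inner_roads, gdzie N to liczba miast nieodwiedzonych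
--         val += table[i]
--     return val
-- ===== SOURCE B (Python) =====
-- def alternative_heuristic(non_visited_cities, roads):
--     n = len(roads)
--     sel = [i for i in range(n) if i in non_visited_cities]
--     entries = [roads[i][j] for i in sel for j in sel]
--     m = len(sel) - 1
--     if m <= 0:
--         return 0
--     return _sum_smallest(entries, m)
--
--
-- def _sum_smallest(t, m):
--     # quickselect-style partial selection: sum of the m smallest values of t
--     acc = 0
--     while m > 0 and t:
--         p = t[len(t) // 2]
--         less = [x for x in t if x < p]
--         if m <= len(less):
--             t = less
--             continue
--         eq_count = sum(1 for x in t if x == p)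
--         if m <= len(less) + eq_count:
--             return acc + sum(less) + p * (m - len(less))
--         acc += sum(less) + p * eq_count
--         m -= len(less) + eq_count
--         t = [x for x in t if x > p]
--     return acc
-- ===== Notes on version B (the rewrite author's own statement) =====
-- stated objective: faster
-- what changed: B selects the indices once, flattens the sub-matrix in one comprehension, and replaces the full sort of all N^2 entries by a quickselect-style three-way-partition recursion that sums the N-1 smallest entries directly.
import Mathlib
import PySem

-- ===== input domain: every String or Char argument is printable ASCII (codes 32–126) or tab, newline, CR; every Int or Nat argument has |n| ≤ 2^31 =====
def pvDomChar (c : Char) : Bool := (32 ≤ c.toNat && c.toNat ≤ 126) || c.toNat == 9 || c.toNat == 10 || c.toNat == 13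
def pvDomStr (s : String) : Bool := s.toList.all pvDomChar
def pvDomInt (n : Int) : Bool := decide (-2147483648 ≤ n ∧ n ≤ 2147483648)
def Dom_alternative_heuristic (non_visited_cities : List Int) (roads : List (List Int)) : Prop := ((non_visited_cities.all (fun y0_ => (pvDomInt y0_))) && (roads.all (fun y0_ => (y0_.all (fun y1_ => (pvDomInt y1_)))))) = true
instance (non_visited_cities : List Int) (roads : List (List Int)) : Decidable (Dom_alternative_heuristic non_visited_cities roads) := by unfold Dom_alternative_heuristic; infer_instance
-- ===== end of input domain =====

-- B replaces A's full sort of all N^2 sub-matrix entries by a quickselect-style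
-- three-way-partition selection that sums the N-1 smallest entries directly (objective: faster).

-- ===== PORT A =====
-- literal transliteration of A: restrict roads to the non-visited rows/columns,
-- flatten every entry into `table`, sort it, and sum its first N-1 elements.
def alternative_heuristic (non_visited_cities : List Int) (roads : List (List Int)) : Int :=
  let inner : List (List Int) :=
    (PySem.List.pyRange 0 (roads.length : Int) 1).foldl (fun acc i =>
      if non_visited_cities.contains i then
        acc ++ [((PySem.List.pyRange 0 (roads.length : Int) 1).filter
            (fun j => non_visited_cities.contains j)).map
            (fun j => PySem.List.pyGetD (PySem.List.pyGetD roads i []) j 0)]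
      else acc) []
  let table : List Int :=
    (PySem.List.pyRange 0 (inner.length : Int) 1).foldl (fun acc i =>
      (PySem.List.pyRange 0 (inner.length : Int) 1).foldl (fun acc2 j =>
        acc2 ++ [PySem.List.pyGetD (PySem.List.pyGetD inner i []) j 0]) acc) []
  let sortedTable := PySem.List.sorted table (fun x => x) false
  if sortedTable.length = 0 then 0
  else (PySem.List.pyRange 0 ((inner.length : Int) - 1) 1).foldl
        (fun val i => val + PySem.List.pyGetD sortedTable i 0) 0

-- ===== PORT B =====
-- termination helper for the loop below: the pivot t[len(t)//2] is an element of t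
theorem pivot_mem (t : List Int) (h : t ≠ []) : t.getD (t.length / 2) 0 ∈ t := by
  rw [List.getD_eq_getElem?_getD, List.getElem?_eq_getElem
    (Nat.div_lt_self (List.length_pos_iff.mpr h) (by omega))]
  exact List.getElem_mem _

-- B-side helper: the `while` loop of _sum_smallest in Source B, transcribed as the
-- obvious tail recursion on the shrinking list `t`.
def sumSmallestLoop (t : List Int) (m : Int) (acc : Int) : Int :=
  if h : m ≤ 0 ∨ t = [] then acc
  else
    let p := t.getD (t.length / 2) 0
    let less := t.filter (fun x => decide (x < p))
    if m ≤ (less.length : Int) then sumSmallestLoop less m acc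
    else
      let eqc := (t.filter (fun x => decide (x = p))).length
      if m ≤ ((less.length : Int) + (eqc : Int)) then
        acc + less.sum + p * (m - (less.length : Int))
      else
        sumSmallestLoop (t.filter (fun x => decide (p < x)))
          (m - (less.length : Int) - (eqc : Int))
          (acc + less.sum + p * (eqc : Int))
termination_by t.length
decreasing_by
  all_goals
    simp only [List.length_unattach]
    refine lt_of_lt_of_le (List.length_filter_lt_length_iff_exists.mpr ?_) (by simp)
    exact ⟨⟨t.getD (t.length / 2) 0, pivot_mem t (by tauto)⟩, List.mem_attach _ _, by simp⟩

def alternative_heuristic_alt (non_visited_cities : List Int) (roads : List (List Int)) : Int :=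
  let sel := (PySem.List.pyRange 0 (roads.length : Int) 1).filter
      (fun i => non_visited_cities.contains i)
  let entries := sel.flatMap (fun i => sel.map
      (fun j => PySem.List.pyGetD (PySem.List.pyGetD roads i []) j 0))
  let m := (sel.length : Int) - 1
  if m ≤ 0 then 0 else sumSmallestLoop entries m 0

-- ===== PRECONDITION & SPEC =====
-- Pre_ excludes exactly the inputs where A raises IndexError: a selected row of
-- `roads` too short for some selected column index j.
def Pre_alternative_heuristic (non_visited_cities : List Int) (roads : List (List Int)) : Prop :=
  ∀ i, i < roads.length → (i : Int) ∈ non_visited_cities →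
    ∀ j, j < roads.length → (j : Int) ∈ non_visited_cities →
      j < (roads.getD i []).length
instance (non_visited_cities : List Int) (roads : List (List Int)) : Decidable (Pre_alternative_heuristic non_visited_cities roads) := by unfold Pre_alternative_heuristic; infer_instance

def pvWitness_alternative_heuristic : List Int × List (List Int) := ([0, 1], [[0, 5], [7, 0]])

def Spec_alternative_heuristic (non_visited_cities : List Int) (roads : List (List Int)) (out : Int) : Prop := out = alternative_heuristic_alt non_visited_cities roads
instance (non_visited_cities : List Int) (roads : List (List Int)) (out : Int) : Decidable (Spec_alternative_heuristic non_visited_cities roads out) := by unfold Spec_alternative_heuristic; infer_instance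

-- ===== CLAIM (what is proved, stated in full; the proofs are below) =====
def Claim_equal_alternative_heuristic : Prop := ∀ (non_visited_cities : List Int) (roads : List (List Int)), Dom_alternative_heuristic non_visited_cities roads → Pre_alternative_heuristic non_visited_cities roads → Spec_alternative_heuristic non_visited_cities roads (alternative_heuristic non_visited_cities roads)

-- ===== LEMMAS AND PROOFS =====

-- a count over a filter whose predicate rejects the counted value is zero
theorem count_filter_neg {p : Int → Bool} {a : Int} {l : List Int} (h : p a = false) :
    List.count a (l.filter p) = 0 :=
  List.count_eq_zero.mpr (fun hm => by simp [List.mem_filter, h] at hm)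

-- the three-way partition of a list at a pivot p ∈ t, read off from sorted(t)
theorem sorted_partition (t : List Int) (p : Int) (hp : p ∈ t) :
    (PySem.List.sorted t (fun x => x) false) =
      (PySem.List.sorted (t.filter (fun x => decide (x < p))) (fun x => x) false) ++
      List.replicate ((t.filter (fun x => decide (x = p))).length) p ++
      (PySem.List.sorted (t.filter (fun x => decide (p < x))) (fun x => x) false) := by
  have heq : (t.filter (fun x => decide (x = p))) =
      List.replicate ((t.filter (fun x => decide (x = p))).length) p := by
    rw [List.eq_replicate_iff]
    refine ⟨rfl, ?_⟩
    intro b hb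
    have := List.of_mem_filter hb
    simpa using this
  apply PySem.List.sorted_id_eq_of_perm_of_pairwise
  · -- permutation
    rw [← heq]
    refine List.Perm.trans
      (l₂ := t.filter (fun x => decide (x < p)) ++ t.filter (fun x => decide (x = p)) ++
             t.filter (fun x => decide (p < x))) ?_ ?_
    · exact ((PySem.List.sorted_perm _ _ _).append (List.Perm.refl _)).append
        (PySem.List.sorted_perm _ _ _)
    · refine List.perm_iff_count.mpr ?_
      intro a
      simp only [List.count_append]
      rcases lt_trichotomy a p with h | h | h
      · rw [List.count_filter (by simpa using h),
            count_filter_neg (p := fun x => decide (x = p)) (by simp; omega),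
            count_filter_neg (p := fun x => decide (p < x)) (by simp; omega)]
        omega
      · subst h
        rw [count_filter_neg (by simp),
            List.count_filter (by simp),
            count_filter_neg (by simp)]
        omega
      · rw [count_filter_neg (p := fun x => decide (x < p)) (by simp; omega),
            count_filter_neg (p := fun x => decide (x = p)) (by simp; omega),
            List.count_filter (by simpa using h)]
        omega
  · -- sortedness
    rw [List.pairwise_append, List.pairwise_append]
    refine ⟨⟨by simpa using PySem.List.sorted_pairwise _ (fun x : Int => x), ?_, ?_⟩, ?_, ?_⟩
    · exact List.pairwise_replicate_of_refl
    · intro a ha b hb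
      have ha' := List.of_mem_filter ((PySem.List.mem_sorted _ _ _ _).mp ha)
      have hb' := List.eq_of_mem_replicate hb
      simp at ha'; omega
    · refine (by simpa using PySem.List.sorted_pairwise _ (fun x : Int => x))
    · intro a ha b hb
      rcases List.mem_append.mp ha with ha | ha
      · have ha' := List.of_mem_filter ((PySem.List.mem_sorted _ _ _ _).mp ha)
        have hb' := List.of_mem_filter ((PySem.List.mem_sorted _ _ _ _).mp hb)
        simp at ha' hb'; omega
      · have ha' := List.eq_of_mem_replicate ha
        have hb' := List.of_mem_filter ((PySem.List.mem_sorted _ _ _ _).mp hb)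
        simp at hb'; omega

-- the selection loop computes acc + sum of the m smallest elements of t
theorem sumSmallestLoop_eq (n : Nat) :
    ∀ (t : List Int), t.length ≤ n → ∀ (m acc : Int),
      sumSmallestLoop t m acc =
        acc + ((PySem.List.sorted t (fun x => x) false).take m.toNat).sum := by
  induction n with
  | zero =>
    intro t ht m acc
    have ht' : t = [] := List.length_eq_zero_iff.mp (Nat.le_zero.mp ht)
    subst ht'
    rw [sumSmallestLoop]
    simp [PySem.List.sorted]
  | succ n ih =>
    intro t ht m acc
    rw [sumSmallestLoop]
    by_cases h0 : m ≤ 0 ∨ t = []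
    · rw [dif_pos h0]
      rcases h0 with h0 | h0
      · rw [Int.toNat_of_nonpos h0]; simp
      · subst h0; simp [PySem.List.sorted]
    · rw [dif_neg h0]
      push_neg at h0
      obtain ⟨hm0, htne⟩ := h0
      set p := t.getD (t.length / 2) 0 with hpdef
      have hp : p ∈ t := pivot_mem t htne
      set less := t.filter (fun x => decide (x < p)) with hless
      set eqs := t.filter (fun x => decide (x = p)) with heqs
      set gr := t.filter (fun x => decide (p < x)) with hgr
      have hlesslt : less.length < t.length :=
        List.length_filter_lt_length_iff_exists.mpr ⟨p, hp, by simp⟩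
      have hgrlt : gr.length < t.length :=
        List.length_filter_lt_length_iff_exists.mpr ⟨p, hp, by simp⟩
      have hsplit := sorted_partition t p hp
      rw [← hless, ← heqs, ← hgr] at hsplit
      have hLlen : (PySem.List.sorted less (fun x => x) false).length = less.length :=
        PySem.List.length_sorted _ _ _
      have hLsum : (PySem.List.sorted less (fun x => x) false).sum = less.sum :=
        (PySem.List.sorted_perm _ _ _).sum_eq
      by_cases h1 : m ≤ (less.length : Int)
      · rw [if_pos h1, ih less (by omega) m acc, hsplit, List.take_append, List.take_append]
        have hz1 : m.toNat - (PySem.List.sorted less (fun x => x) false).length = 0 := by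
          omega
        have hz2 : m.toNat - ((PySem.List.sorted less (fun x => x) false) ++
            List.replicate eqs.length p).length = 0 := by
          simp only [List.length_append, List.length_replicate]; omega
        rw [hz1, hz2]
        simp
      · rw [if_neg h1]
        push_neg at h1
        have htake1 : (PySem.List.sorted less (fun x => x) false).take m.toNat =
            PySem.List.sorted less (fun x => x) false :=
          List.take_of_length_le (by omega)
        by_cases h2 : m ≤ ((less.length : Int) + ((eqs.length : Nat) : Int))
        · rw [if_pos h2, hsplit, List.take_append, List.take_append, htake1,
              List.take_replicate]
          simp only [List.length_append, List.length_replicate, List.sum_append,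
            List.sum_replicate, smul_eq_mul, hLsum, hLlen]
          have hz : m.toNat - (less.length + eqs.length) = 0 := by omega
          have hmin : min (m.toNat - less.length) eqs.length = m.toNat - less.length := by
            omega
          rw [hz, hmin]
          simp only [List.take_zero, List.sum_nil, nsmul_eq_mul, ← hless]
          rw [Nat.cast_sub (by omega), Int.toNat_of_nonneg (by omega : (0:Int) ≤ m)]
          ring
        · rw [if_neg h2]
          push_neg at h2
          rw [ih gr (by omega) _ _, hsplit, List.take_append, List.take_append, htake1,
              List.take_replicate]
          simp only [List.length_append, List.length_replicate, List.sum_append,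
            List.sum_replicate, smul_eq_mul, hLsum, hLlen]
          have hmin : min (m.toNat - less.length) eqs.length = eqs.length := by omega
          have harg : (m - (less.length : Int) - ((eqs.length : Nat) : Int)).toNat =
              m.toNat - (less.length + eqs.length) := by omega
          rw [hmin, harg]
          push_cast
          ring

-- the flattening double loop of A over a square matrix of rows of equal length
theorem tableFlatten (M : List (List Int)) (h : ∀ r ∈ M, r.length = M.length) :
    (PySem.List.pyRange 0 (M.length : Int) 1).foldl (fun acc i =>
      (PySem.List.pyRange 0 (M.length : Int) 1).foldl (fun acc2 j =>
        acc2 ++ [PySem.List.pyGetD (PySem.List.pyGetD M i []) j 0]) acc) [] = M.flatten := by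
  have inner1 : ∀ (acc : List Int) (r : List Int), r ∈ M →
      (PySem.List.pyRange 0 (M.length : Int) 1).foldl (fun acc2 j =>
        acc2 ++ [PySem.List.pyGetD r j 0]) acc = acc ++ r := by
    intro acc r hr
    rw [show (M.length : Int) = (r.length : Int) by rw [h r hr]]
    exact (PySem.List.foldl_pyRange_zero_pyGetD' r 0 (fun a x => a ++ [x]) acc).trans
      (PySem.List.foldl_append_singleton_eq_self r acc)
  rw [PySem.List.foldl_congr_mem _ _
      (fun acc i => acc ++ PySem.List.pyGetD M i []) []
      (by
        intro acc i hi
        have hi' := PySem.List.mem_pyRange_one.mp hi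
        exact inner1 acc _ (PySem.List.pyGetD_mem M [] (by
          unfold PySem.Raise.InRange; omega)))]
  exact (PySem.List.foldl_pyRange_zero_pyGetD' M [] (fun a r => a ++ r) []).trans
    (by simpa using PySem.List.foldl_append_eq_flatten M [])

-- A's final partial-sum loop is the sum of the first c sorted entries
theorem loopSum (S : List Int) (c : Nat) (hc : c ≤ S.length) :
    (PySem.List.pyRange 0 (c : Int) 1).foldl (fun val i => val + PySem.List.pyGetD S i 0) 0 =
      (S.take c).sum := by
  have hlen : ((S.take c).length : Int) = (c : Int) := by
    simp [List.length_take]; omega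
  have hcongr := PySem.List.foldl_congr_mem
      (PySem.List.pyRange 0 (c : Int) 1)
      (fun val i => val + PySem.List.pyGetD S i 0)
      (fun val i => val + PySem.List.pyGetD (S.take c) i 0) 0
      (by
        intro val i hi
        have hi' := PySem.List.mem_pyRange_one.mp hi
        have hlt : i < ((S.take c).length : Int) := by
          simp only [List.length_take]; omega
        simp only
        congr 1
        rw [PySem.List.pyGetD_eq_getElem S 0 (by omega) (by omega),
            PySem.List.pyGetD_eq_getElem (S.take c) 0 (by omega) hlt]
        exact (List.getElem_take).symm)
  rw [hcongr, ← hlen]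
  exact (PySem.List.foldl_pyRange_zero_pyGetD' (S.take c) 0 (fun a x => a + x) 0).trans
    (by rw [← List.sum_eq_foldl])

-- ===== VERDICT (by name: the statement is the Claim_ definition above) =====
theorem alternative_heuristic_spec : Claim_equal_alternative_heuristic := by
  intro nv roads _ _
  unfold Spec_alternative_heuristic alternative_heuristic alternative_heuristic_alt
  set sel := (PySem.List.pyRange 0 (roads.length : Int) 1).filter
      (fun i => nv.contains i) with hsel
  set ent := fun i => sel.map (fun j => PySem.List.pyGetD (PySem.List.pyGetD roads i []) j 0)
    with hent
  -- A's inner_roads is sel.map ent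
  rw [PySem.List.foldl_append_if (fun i => nv.contains i) ent _ []]
  simp only [List.nil_append]
  set inner := sel.map ent with hinner
  have hinlen : inner.length = sel.length := List.length_map ..
  have hrows : ∀ r ∈ inner, r.length = inner.length := by
    intro r hr
    obtain ⟨i, _, rfl⟩ := List.mem_map.mp hr
    simp [hent, hinlen]
  -- A's table is inner.flatten = B's entries
  rw [tableFlatten inner hrows]
  have hflat : inner.flatten = sel.flatMap ent := by
    rw [hinner, List.flatMap_def]
  rw [hflat]
  set entries := sel.flatMap ent with hentr
  have hentlen : entries.length = sel.length * sel.length := by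
    rw [hentr, List.length_flatMap]
    have : (sel.map fun i => (ent i).length) = sel.map (fun _ => sel.length) := by
      apply List.map_congr_left; intro i _; simp [hent]
    rw [this, List.map_const', List.sum_replicate, smul_eq_mul]
  have hslen : (PySem.List.sorted entries (fun x => x) false).length = entries.length :=
    PySem.List.length_sorted _ _ _
  by_cases hk : sel.length = 0
  · -- no selected city: both sides 0
    have : entries = [] := List.length_eq_zero_iff.mp (by simp [hentlen, hk])
    rw [this]
    simp [PySem.List.sorted, hk]
  · -- at least one selected city: A runs its partial-sum loop
    have hne : ¬ (PySem.List.sorted entries (fun x => x) false).length = 0 := by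
      rw [hslen, hentlen]; positivity
    rw [if_neg hne]
    by_cases hk1 : sel.length = 1
    · -- single city: empty range on A's side, m = 0 on B's side
      rw [hinlen, hk1]
      norm_num [PySem.List.pyRange_one_eq_nil]
    · have hk2 : 2 ≤ sel.length := by omega
      rw [if_neg (c := ((sel.length : Int) - 1 ≤ 0)) (by omega)]
      rw [sumSmallestLoop_eq entries.length entries le_rfl _ 0, zero_add]
      rw [hinlen, show ((sel.length : Int) - 1) = ((sel.length - 1 : Nat) : Int) by omega]
      rw [loopSum _ (sel.length - 1) (by
        rw [hslen, hentlen]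
        have := Nat.le_mul_of_pos_left sel.length (show 0 < sel.length by omega)
        omega)]
      simp
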